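-- pv_equiv track=rewrite | github.com/shdubsh/statsd-exporter-tools | src/test.py | match_glob
-- ===== SOURCE A (Python) =====
-- def match_glob(pattern, line):
--     groups = []
--     pattern_segments = pattern.split('.')
--     line_segments = line.split('.')
--     if len(pattern_segments) != len(line_segments):
--         return None
--     for index, pattern in enumerate(pattern_segments):
--         if pattern == '*':
--             groups.append(line_segments[index])
--             continue
--         else:
--             if pattern != line_segments[index]:
--                 return None
--     return groups
-- ===== SOURCE B (Python) =====
-- def match_glob(pattern, line):
--     def go(ps, ls):
--         if not ps and not ls:
--             return []
--         if not ps or not ls: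
--             return None
--         rest = go(ps[1:], ls[1:])
--         if rest is None:
--             return None
--         if ps[0] == '*':
--             return [ls[0]] + rest
--         return rest if ps[0] == ls[0] else None
--     return go(pattern.split('.'), line.split('.'))
-- ===== Notes on version B (the rewrite author's own statement) =====
-- stated objective: alternative
-- what changed: Replaces the up-front length check plus indexed enumerate loop with a direct structural recursion over the two segment lists, consing captured wildcard segments onto the recursive result instead of appending to an accumulator.
import Mathlib
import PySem

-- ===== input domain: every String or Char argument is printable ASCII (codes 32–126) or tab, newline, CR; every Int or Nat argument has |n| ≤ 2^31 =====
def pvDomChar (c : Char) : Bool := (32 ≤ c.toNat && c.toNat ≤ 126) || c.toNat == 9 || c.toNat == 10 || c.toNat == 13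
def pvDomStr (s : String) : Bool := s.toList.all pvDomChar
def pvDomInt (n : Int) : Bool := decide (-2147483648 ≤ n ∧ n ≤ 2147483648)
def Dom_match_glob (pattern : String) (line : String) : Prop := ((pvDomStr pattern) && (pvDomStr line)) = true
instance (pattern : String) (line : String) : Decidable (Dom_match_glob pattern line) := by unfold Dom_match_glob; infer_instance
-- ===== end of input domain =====

-- ===== PORT A =====
-- B replaces A's length check + indexed enumerate loop by a structural recursion over both segment lists (alternative decomposition, same cost).
-- A's for-loop with its two early returns; lineSegs fixed, state = remaining enumerate list and groups
def matchGlobLoopA (lineSegs : List String) : List (Int × String) → List String → Option (List String)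
  | [], groups => some groups
  | (idx, pat) :: rest, groups =>
    if pat = "*" then
      match PySem.List.pyGet? lineSegs idx with
      | some s => matchGlobLoopA lineSegs rest (groups ++ [s])
      | none => none
    else
      match PySem.List.pyGet? lineSegs idx with
      | some s => if pat ≠ s then none else matchGlobLoopA lineSegs rest groups
      | none => none

def match_glob (pattern : String) (line : String) : Option (List String) :=
  match PySem.Str.split? pattern "." with          -- sep "." is non-empty, so the none branch is dead
  | none => none
  | some pattern_segments =>
    match PySem.Str.split? line "." with
    | none => none
    | some line_segments =>
      if pattern_segments.length ≠ line_segments.length then none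
      else matchGlobLoopA line_segments (PySem.List.enumerate pattern_segments 0) []

-- ===== PORT B =====
def matchGlobGo : List String → List String → Option (List String)
  | [], [] => some []
  | [], _ :: _ => none
  | _ :: _, [] => none
  | p :: ps, l :: ls =>
    match matchGlobGo ps ls with
    | none => none
    | some rest =>
      if p = "*" then some (l :: rest)
      else if p = l then some rest else none

def match_glob_alt (pattern : String) (line : String) : Option (List String) :=
  match PySem.Str.split? pattern "." with          -- sep "." is non-empty, so the none branch is dead
  | none => none
  | some ps =>
    match PySem.Str.split? line "." with
    | none => none
    | some ls => matchGlobGo ps ls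

-- ===== PRECONDITION & SPEC =====
def Spec_match_glob (pattern : String) (line : String) (out : Option (List String)) : Prop := out = match_glob_alt pattern line
instance (pattern : String) (line : String) (out : Option (List String)) : Decidable (Spec_match_glob pattern line out) := by unfold Spec_match_glob; infer_instance

-- ===== CLAIM (what is proved, stated in full; the proofs are below) =====
def Claim_equal_match_glob : Prop := ∀ (pattern : String) (line : String), Dom_match_glob pattern line → Spec_match_glob pattern line (match_glob pattern line)

-- ===== LEMMAS AND PROOFS =====

theorem matchGlobGo_none_of_length_ne : ∀ (ps ls : List String), ps.length ≠ ls.length → matchGlobGo ps ls = none := by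
  intro ps
  induction ps with
  | nil =>
    intro ls h
    cases ls with
    | nil => simp at h
    | cons l ls => simp [matchGlobGo]
  | cons p ps ih =>
    intro ls h
    cases ls with
    | nil => simp [matchGlobGo]
    | cons l ls =>
      have : ps.length ≠ ls.length := by simpa using h
      simp [matchGlobGo, ih ls this]

theorem loopA_eq_go : ∀ (ps ls pre groups : List String), ps.length = ls.length →
    matchGlobLoopA (pre ++ ls) (PySem.List.enumerate ps (pre.length : Int)) groups
      = (matchGlobGo ps ls).map (fun r => groups ++ r) := by
  intro ps
  induction ps with
  | nil =>
    intro ls pre groups h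
    cases ls with
    | nil => simp [PySem.List.enumerate_nil, matchGlobLoopA, matchGlobGo]
    | cons l ls => simp at h
  | cons p ps ih =>
    intro ls pre groups h
    cases ls with
    | nil => simp at h
    | cons l ls =>
      have hlen : ps.length = ls.length := by simpa using h
      have hget : PySem.List.pyGet? (pre ++ l :: ls) (pre.length : Int) = some l := by
        simp [PySem.List.pyGet?, PySem.List.pyIdx?]
      rw [PySem.List.enumerate_cons]
      have hcast : (pre.length : Int) + 1 = ((pre ++ [l]).length : Int) := by simp
      have happ : pre ++ l :: ls = (pre ++ [l]) ++ ls := by simp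
      by_cases hp : p = "*"
      · simp only [matchGlobLoopA, hp, if_pos, hget]
        rw [happ, hcast, ih ls (pre ++ [l]) (groups ++ [l]) hlen]
        cases hgo : matchGlobGo ps ls with
        | none => simp [matchGlobGo, hgo]
        | some rest => simp [matchGlobGo, hgo]
      · have hstep : matchGlobLoopA (pre ++ l :: ls)
            (((pre.length : Int), p) :: PySem.List.enumerate ps ((pre.length : Int) + 1)) groups
            = if p = l then matchGlobLoopA (pre ++ l :: ls)
                (PySem.List.enumerate ps ((pre.length : Int) + 1)) groups
              else none := by
          by_cases hpl : p = l
          · have hl : ¬ l = "*" := hpl ▸ hp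
            simp [matchGlobLoopA, hpl, hl]
          · simp [matchGlobLoopA, hp, hpl]
        rw [hstep]
        by_cases hpl : p = l
        · have hl : ¬ l = "*" := by rw [← hpl]; exact hp
          rw [if_pos hpl, happ, hcast, ih ls (pre ++ [l]) groups hlen]
          cases hgo : matchGlobGo ps ls with
          | none => simp [matchGlobGo, hgo]
          | some rest => simp [matchGlobGo, hgo, hpl]; exact hl
        · rw [if_neg hpl]
          cases hgo : matchGlobGo ps ls with
          | none => simp [matchGlobGo, hgo]
          | some rest => simp [matchGlobGo, hgo, hp, hpl]

-- ===== VERDICT (by name: the statement is the Claim_ definition above) =====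
theorem match_glob_spec : Claim_equal_match_glob := by
  intro pattern line _
  unfold Spec_match_glob match_glob match_glob_alt
  cases hp : PySem.Str.split? pattern "." with
  | none => rfl
  | some ps =>
    cases hl : PySem.Str.split? line "." with
    | none => rfl
    | some ls =>
      by_cases h : ps.length = ls.length
      · have key := loopA_eq_go ps ls [] [] h
        simp only [List.nil_append, List.length_nil, Nat.cast_zero] at key
        simp only [h, ne_eq, not_true_eq_false, if_false, key]
        cases hgo : matchGlobGo ps ls <;> simp
      · simp [h, matchGlobGo_none_of_length_ne ps ls h]
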